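-- pv_equiv track=rewrite | github.com/AdamsLu/Tencent | code/agent_ppo/feature/preprocessor.py | _extract_center_patch
-- ===== SOURCE A (Python) =====
-- def _extract_center_patch(map_info, patch_size=5):
--     """Extract a centered local patch from map_info, out-of-bound filled with -1."""
--     if map_info is None:
--         return [[-1 for _ in range(patch_size)] for _ in range(patch_size)]
--
--     rows = len(map_info)
--     cols = len(map_info[0]) if rows > 0 else 0
--     if rows == 0 or cols == 0:
--         return [[-1 for _ in range(patch_size)] for _ in range(patch_size)]
--
--     center_r = rows // 2
--     center_c = cols // 2
--     half = patch_size // 2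
--     patch = []
--     for r in range(center_r - half, center_r + half + 1):
--         row_vals = []
--         for c in range(center_c - half, center_c + half + 1):
--             if 0 <= r < rows and 0 <= c < cols:
--                 row_vals.append(int(map_info[r][c]))
--             else:
--                 row_vals.append(-1)
--         patch.append(row_vals)
--     return patch
-- ===== SOURCE B (Python) =====
-- def _extract_center_patch(map_info, patch_size=5):
--     """Extract a centered local patch, out-of-bounds filled with -1 (row slicing + padding)."""
--     if map_info is None:
--         return [[-1] * patch_size for _ in range(patch_size)]
--     rows = len(map_info)
--     cols = len(map_info[0]) if rows > 0 else 0
--     if rows == 0 or cols == 0: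
--         return [[-1] * patch_size for _ in range(patch_size)]
--     half = patch_size // 2
--     n = 2 * half + 1
--     top = rows // 2 - half
--     left = cols // 2 - half
--     a = max(0, left)
--     b = min(cols, left + n)
--     pad_l = [-1] * (a - left)
--     pad_r = [-1] * (left + n - b)
--     blank = [-1] * n
--     patch = []
--     for r in range(top, top + n):
--         if 0 <= r < rows:
--             patch.append(pad_l + [int(v) for v in map_info[r][a:b]] + pad_r)
--         else:
--             patch.append(list(blank))
--     return patch
-- ===== Notes on version B (the rewrite author's own statement) =====
-- stated objective: alternative
-- what changed: B builds each output row by slicing the clamped in-range segment out of the map row and concatenating it between precomputed -1 padding lists, instead of A's per-cell bounds test inside a nested loop.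
import Mathlib
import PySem

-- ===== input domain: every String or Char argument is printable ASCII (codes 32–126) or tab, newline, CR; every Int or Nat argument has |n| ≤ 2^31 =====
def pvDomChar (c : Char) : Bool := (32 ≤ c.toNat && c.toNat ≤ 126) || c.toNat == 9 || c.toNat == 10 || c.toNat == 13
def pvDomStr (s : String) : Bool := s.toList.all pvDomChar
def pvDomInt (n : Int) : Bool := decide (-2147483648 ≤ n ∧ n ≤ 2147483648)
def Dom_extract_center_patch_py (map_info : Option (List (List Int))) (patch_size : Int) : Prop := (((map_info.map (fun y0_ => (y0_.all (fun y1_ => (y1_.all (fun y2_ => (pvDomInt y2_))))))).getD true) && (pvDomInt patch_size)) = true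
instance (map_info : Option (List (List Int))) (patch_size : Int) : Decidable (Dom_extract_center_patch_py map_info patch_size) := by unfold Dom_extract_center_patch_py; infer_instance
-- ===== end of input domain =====

-- B builds each output row by slicing the clamped in-range segment out of the map row and
-- concatenating it between precomputed -1 padding lists, replacing A's per-cell bounds test
-- (alternative decomposition; no speed claim).

-- ===== PORT A =====
def extract_center_patch_py (map_info : Option (List (List Int))) (patch_size : Int) : List (List Int) :=
  match map_info with
  | none =>
      (PySem.List.pyRange 0 patch_size 1).map (fun _ =>
        (PySem.List.pyRange 0 patch_size 1).map (fun _ => (-1 : Int)))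
  | some m =>
      let rows : Int := m.length
      let cols : Int := if rows > 0 then ((m.getD 0 []).length : Int) else 0
      if rows = 0 ∨ cols = 0 then
        (PySem.List.pyRange 0 patch_size 1).map (fun _ =>
          (PySem.List.pyRange 0 patch_size 1).map (fun _ => (-1 : Int)))
      else
        let center_r := PySem.Int.floordiv rows 2
        let center_c := PySem.Int.floordiv cols 2
        let half := PySem.Int.floordiv patch_size 2
        (PySem.List.pyRange (center_r - half) (center_r + half + 1) 1).map (fun r =>
          (PySem.List.pyRange (center_c - half) (center_c + half + 1) 1).map (fun c =>
            if 0 ≤ r ∧ r < rows ∧ 0 ≤ c ∧ c < cols then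
              -- map_info[r][c]: in range under the branch and Pre_ (else Python raises, excluded)
              (m.getD r.toNat []).getD c.toNat (-1)
            else (-1 : Int)))

-- ===== PORT B =====
def extract_center_patch_py_alt (map_info : Option (List (List Int))) (patch_size : Int) : List (List Int) :=
  match map_info with
  | none =>
      List.replicate patch_size.toNat (List.replicate patch_size.toNat (-1 : Int))
  | some m =>
      let rows : Int := m.length
      let cols : Int := if rows > 0 then ((m.getD 0 []).length : Int) else 0
      if rows = 0 ∨ cols = 0 then
        List.replicate patch_size.toNat (List.replicate patch_size.toNat (-1 : Int))
      else
        let half := PySem.Int.floordiv patch_size 2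
        let n := 2 * half + 1
        let top := PySem.Int.floordiv rows 2 - half
        let left := PySem.Int.floordiv cols 2 - half
        let a := max 0 left
        let b := min cols (left + n)
        let padL := List.replicate (a - left).toNat (-1 : Int)
        let padR := List.replicate (left + n - b).toNat (-1 : Int)
        let blank := List.replicate n.toNat (-1 : Int)
        (PySem.List.pyRange top (top + n) 1).map (fun r =>
          if 0 ≤ r ∧ r < rows then
            padL ++ PySem.List.slice (m.getD r.toNat []) (some a) (some b) ++ padR
          else blank)

-- ===== PRECONDITION & SPEC =====
-- Pre_ excludes exactly the inputs on which A raises IndexError: ragged maps in which some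
-- patch-covered row is shorter than the patch's rightmost covered column.
def Pre_extract_center_patch_py (map_info : Option (List (List Int))) (patch_size : Int) : Prop :=
  ∀ r ∈ PySem.List.pyRange
      (max 0 (PySem.Int.floordiv ((map_info.getD []).length : Int) 2 - PySem.Int.floordiv patch_size 2))
      (min ((map_info.getD []).length : Int)
           (PySem.Int.floordiv ((map_info.getD []).length : Int) 2 + PySem.Int.floordiv patch_size 2 + 1)) 1,
    min (((map_info.getD []).getD 0 []).length : Int)
        (PySem.Int.floordiv (((map_info.getD []).getD 0 []).length : Int) 2 + PySem.Int.floordiv patch_size 2 + 1)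
      ≤ (((map_info.getD []).getD r.toNat []).length : Int)
instance (map_info : Option (List (List Int))) (patch_size : Int) : Decidable (Pre_extract_center_patch_py map_info patch_size) := by unfold Pre_extract_center_patch_py; infer_instance

def pvWitness_extract_center_patch_py : Option (List (List Int)) × Int := (some [[1, 2], [3, 4]], 3)

def Spec_extract_center_patch_py (map_info : Option (List (List Int))) (patch_size : Int) (out : List (List Int)) : Prop := out = extract_center_patch_py_alt map_info patch_size
instance (map_info : Option (List (List Int))) (patch_size : Int) (out : List (List Int)) : Decidable (Spec_extract_center_patch_py map_info patch_size out) := by unfold Spec_extract_center_patch_py; infer_instance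

-- ===== CLAIM (what is proved, stated in full; the proofs are below) =====
def Claim_equal_extract_center_patch_py : Prop := ∀ (map_info : Option (List (List Int))) (patch_size : Int), Dom_extract_center_patch_py map_info patch_size → Pre_extract_center_patch_py map_info patch_size → Spec_extract_center_patch_py map_info patch_size (extract_center_patch_py map_info patch_size)

-- ===== LEMMAS AND PROOFS =====

lemma getD_eq_of_get? {α : Type} (l : List α) (i : Nat) (d a : α) (h : l[i]? = some a) :
    l.getD i d = a := by
  rw [List.getD_eq_getElem?_getD, h]; rfl

-- a constant comprehension over range(a, b) is [x] * (b - a)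
lemma map_const_pyRange {α : Type} (a b : Int) (x : α) :
    (PySem.List.pyRange a b 1).map (fun _ => x) = List.replicate (b - a).toNat x := by
  rw [List.map_const']
  simp [PySem.List.length_pyRange_one]

-- reading map row cells over an in-bounds index range is the corresponding drop/take segment
lemma map_getD_eq_drop_take {α : Type} (d : α) :
    ∀ (k : Nat) (xs : List α) (a b : Int), 0 ≤ a → b ≤ (xs.length : Int) → (b - a).toNat = k →
      (PySem.List.pyRange a b 1).map (fun c => xs.getD c.toNat d) = (xs.drop a.toNat).take k := by
  intro k
  induction k with
  | zero =>
    intro xs a b ha hb hk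
    rw [PySem.List.pyRange_one_eq_nil (by omega), List.map_nil, List.take_zero]
  | succ k ih =>
    intro xs a b ha hb hk
    have hab : a < b := by omega
    have hlen : a.toNat < xs.length := by
      have h1 := Int.toNat_of_nonneg ha
      omega
    rw [PySem.List.pyRange_one_cons hab, List.map_cons,
      ih xs (a + 1) b (by omega) hb (by omega),
      List.drop_eq_getElem_cons hlen, List.take_succ_cons,
      getD_eq_of_get? xs a.toNat d xs[a.toNat] (List.getElem?_eq_getElem hlen)]
    rw [show (a+1).toNat = a.toNat + 1 from by omega]

set_option maxHeartbeats 1000000 in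
theorem extract_center_patch_py_spec : Claim_equal_extract_center_patch_py := by
  intro mi ps _ hpre
  unfold Spec_extract_center_patch_py
  cases mi with
  | none =>
    simp [extract_center_patch_py, extract_center_patch_py_alt, map_const_pyRange]
  | some m =>
    simp only [extract_center_patch_py, extract_center_patch_py_alt]
    by_cases hrows : m.length = 0
    · simp [hrows, map_const_pyRange]
    · have hR : ((m.length : Int)) > 0 := by
        have := Nat.pos_of_ne_zero hrows; exact_mod_cast this
      by_cases hcols : (m.getD 0 []).length = 0
      · have hguardT : ((m.length : Int) = 0 ∨
            (if ((m.length : Int)) > 0 then ((m.getD 0 []).length : Int) else 0) = 0) :=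
          Or.inr (by rw [if_pos hR]; exact_mod_cast hcols)
        rw [if_pos hguardT, if_pos hguardT]
        simp [map_const_pyRange]
      · have hC : (0 : Int) < ((m.getD 0 []).length : Int) := by
          have := Nat.pos_of_ne_zero hcols; exact_mod_cast this
        simp only [if_pos hR]
        have hguard : ¬(((m.length : Int)) = 0 ∨ (((m.getD 0 []).length : Int)) = 0) := by omega
        rw [if_neg hguard, if_neg hguard]
        set rowsI : Int := (m.length : Int) with hrowsI
        set colsI : Int := ((m.getD 0 []).length : Int) with hcolsI
        set cr : Int := PySem.Int.floordiv rowsI 2 with hcrdef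
        set cc : Int := PySem.Int.floordiv colsI 2 with hccdef
        set hh : Int := PySem.Int.floordiv ps 2 with hhhdef
        have ecr : cr = rowsI / 2 := by
          rw [hcrdef]; exact PySem.Int.floordiv_eq_ediv_of_pos (by norm_num)
        have ecc : cc = colsI / 2 := by
          rw [hccdef]; exact PySem.Int.floordiv_eq_ediv_of_pos (by norm_num)
        have hcr0 : 0 ≤ cr := by rw [ecr]; positivity
        have hcrlt : cr < rowsI := by rw [ecr]; omega
        have hcc0 : 0 ≤ cc := by rw [ecc]; positivity
        have hcclt : cc < colsI := by rw [ecc]; omega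
        set n : Int := 2 * hh + 1 with hndef
        set top : Int := cr - hh with htopdef
        set left : Int := cc - hh with hleftdef
        set a : Int := max 0 left with hadef
        set b : Int := min colsI (left + n) with hbdef
        have efr : PySem.Int.floordiv ((m.length : Int)) 2 = rowsI / 2 := by
          rw [← hrowsI, ← ecr, hcrdef]
        have efc : PySem.Int.floordiv (((m.getD 0 []).length : Int)) 2 = colsI / 2 := by
          rw [← hcolsI, ← ecc, hccdef]
        have efp : hh = PySem.Int.floordiv ps 2 := hhhdef
        rw [show cr + hh + 1 = top + n by omega, show cc + hh + 1 = left + n by omega]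
        apply List.map_congr_left
        intro r hr
        rw [PySem.List.mem_pyRange_one] at hr
        have hhalf0 : 0 ≤ hh := by omega
        by_cases hrin : 0 ≤ r ∧ r < rowsI
        · rw [if_pos hrin]
          set row : List Int := m.getD r.toNat [] with hrowdef
          -- Pre_ gives b ≤ row.length for this r
          have hrowlen : b ≤ (row.length : Int) := by
            have := hpre r (by
              rw [PySem.List.mem_pyRange_one]
              constructor
              · simp only [Option.getD_some]
                omega
              · simp only [Option.getD_some]
                omega)
            simp only [Option.getD_some] at this
            rw [← hrowdef] at this
            omega
          have hsplit : PySem.List.pyRange left (left + n) 1 =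
              PySem.List.pyRange left a 1 ++ PySem.List.pyRange a b 1 ++ PySem.List.pyRange b (left + n) 1 := by
            rw [← PySem.List.pyRange_one_append left a b (by omega) (by omega),
                ← PySem.List.pyRange_one_append left b (left + n) (by omega) (by omega)]
          rw [hsplit, List.map_append, List.map_append]
          congr 1
          congr 1
          · -- left pad: every c < a = max 0 left is negative
            rw [List.map_congr_left (l := PySem.List.pyRange left a 1)
                  (g := fun _ => (-1 : Int)) (by
                intro c hc
                rw [PySem.List.mem_pyRange_one] at hc
                rw [if_neg (by omega)])]
            rw [map_const_pyRange]
          · -- middle: in-bounds cells are the slice row[a:b]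
            rw [List.map_congr_left (l := PySem.List.pyRange a b 1)
                  (g := fun c => row.getD c.toNat (-1)) (by
                intro c hc
                rw [PySem.List.mem_pyRange_one] at hc
                rw [if_pos (by refine ⟨hrin.1, hrin.2, by omega, by omega⟩)])]
            rw [map_getD_eq_drop_take (-1 : Int) ((b - a).toNat) row a b (by omega) hrowlen rfl,
                PySem.List.slice_toNat row (a := a) (b := b) (by omega) (by omega)]
            congr 1
            omega
          · -- right pad: every c ≥ b with c < left + n is ≥ cols
            rw [List.map_congr_left (l := PySem.List.pyRange b (left + n) 1)
                  (g := fun _ => (-1 : Int)) (by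
                intro c hc
                rw [PySem.List.mem_pyRange_one] at hc
                rw [if_neg (by omega)])]
            rw [map_const_pyRange]
        · rw [if_neg hrin]
          rw [List.map_congr_left (l := PySem.List.pyRange left (left + n) 1)
                (g := fun _ => (-1 : Int)) (by
              intro c hc
              rw [if_neg (by omega)])]
          rw [map_const_pyRange]
          congr 1
          omega

-- ===== VERDICT (by name: the statement is the Claim_ definition above) =====
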